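-- pv_equiv track=rewrite | github.com/Javilejoo/AlgoritmosDeEnrutamiento | dijkstra.py | first_hop
-- ===== SOURCE A (Python) =====
-- from typing import Dict, Optional, List, Tuple
--
-- def first_hop(source: str, dest: str, prev: Dict[str, Optional[str]]) -> Optional[str]:
--     """
--     Dado el diccionario 'prev' (predecesores), obtiene el primer salto (next-hop)
--     desde 'source' hacia 'dest'. Devuelve None si no hay ruta o si dest==source.
--     """
--     if source == dest:
--         return None
--     # Reconstruye camino dest -> source usando prev
--     path: List[str] = []
--     cur = dest
--     while cur is not None:
--         path.append(cur)
--         if cur == source: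
--             break
--         cur = prev[cur]
--     if not path or path[-1] != source:
--         return None  # no hay camino
--     path.reverse()  # ahora: source ... dest
--     return path[1] if len(path) >= 2 else None
-- ===== SOURCE B (Python) =====
-- from typing import Dict, Optional
--
-- def first_hop(source: str, dest: str, prev: Dict[str, Optional[str]]) -> Optional[str]:
--     if source == dest:
--         return None
--     return _hop_to(source, dest, prev)
--
-- def _hop_to(source: str, cur: str, prev: Dict[str, Optional[str]]) -> Optional[str]:
--     """First hop from source toward cur, assuming cur != source: look at cur's
--     predecessor; if it is the source, cur itself is the hop, otherwise recurse."""
--     p = prev[cur]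
--     if p is None:
--         return None
--     if p == source:
--         return cur
--     return _hop_to(source, p, prev)
-- ===== Notes on version B (the rewrite author's own statement) =====
-- stated objective: simpler
-- what changed: B replaces A's path-list construction, last-element validation, reversal and indexing by a direct recursion that looks one step ahead: it inspects cur's predecessor and returns cur as soon as that predecessor is the source.
import Mathlib
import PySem

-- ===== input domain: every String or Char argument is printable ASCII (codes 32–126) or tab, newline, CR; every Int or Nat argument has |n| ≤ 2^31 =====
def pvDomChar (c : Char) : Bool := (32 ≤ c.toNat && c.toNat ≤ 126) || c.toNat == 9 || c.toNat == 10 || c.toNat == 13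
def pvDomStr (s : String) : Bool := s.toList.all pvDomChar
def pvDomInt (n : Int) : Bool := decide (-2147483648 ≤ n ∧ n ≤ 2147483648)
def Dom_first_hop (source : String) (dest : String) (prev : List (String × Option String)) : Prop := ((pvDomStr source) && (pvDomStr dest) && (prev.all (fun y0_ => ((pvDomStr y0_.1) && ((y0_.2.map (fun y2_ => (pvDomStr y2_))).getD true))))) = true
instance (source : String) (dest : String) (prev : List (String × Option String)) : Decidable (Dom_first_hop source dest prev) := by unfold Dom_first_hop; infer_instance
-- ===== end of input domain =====

-- B changes nothing observable: instead of building, validating and reversing the whole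
-- path list, it recurses looking one step ahead at cur's predecessor (objective: simpler).

-- ===== PORT A =====
-- The while-loop of A, fuel-bounded (fuel prev.length+1 always suffices on inputs where
-- the Python loop terminates, see Pre_); `none` = KeyError or fuel exhausted (A raises /
-- diverges there, outside Pre_). Accumulates the `path` list exactly as A does.
def pvBuildPath (source : String) (prev : List (String × Option String)) :
    Nat → String → List String → Option (List String)
  | 0, _, _ => none
  | fuel+1, cur, path =>
    let path := path ++ [cur]
    if cur = source then some path
    else
      match List.lookup cur prev with
      | none => none                            -- KeyError: prev[cur]
      | some none => some path                  -- cur becomes None, loop ends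
      | some (some v) => pvBuildPath source prev fuel v path

def first_hop (source : String) (dest : String) (prev : List (String × Option String)) : Option String :=
  if source = dest then none
  else
    match pvBuildPath source prev (prev.length + 1) dest [] with
    | none => none
    | some path =>
      if path = [] ∨ path.getLast? ≠ some source then none
      else
        let p := path.reverse
        if 2 ≤ p.length then PySem.List.pyGet? p 1 else none

-- ===== PORT B =====
-- B's recursive helper `_hop_to`: look up cur's predecessor p; `none` on KeyError or on
-- a dead end (p is None) or fuel exhaustion; if p is the source, cur is the hop.
def pvHopTo (source : String) (prev : List (String × Option String)) :
    Nat → String → Option String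
  | 0, _ => none
  | fuel+1, cur =>
    match List.lookup cur prev with
    | none => none                              -- KeyError: prev[cur]
    | some none => none                         -- p is None: dead end
    | some (some p) => if p = source then some cur else pvHopTo source prev fuel p

def first_hop_alt (source : String) (dest : String) (prev : List (String × Option String)) : Option String :=
  if source = dest then none
  else pvHopTo source prev (prev.length + 1) dest

-- ===== PRECONDITION & SPEC =====
-- Termination check for the backward walk: true iff every visited node is a key of prev
-- (no KeyError) and the walk ends (at source or at a None predecessor) within the given
-- number of steps. Fuel prev.length+1 is exact: a terminating Python walk never looks up
-- more than prev.length distinct keys, so Pre_ excludes exactly the inputs where the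
-- Python A raises KeyError or loops forever (it excludes no input on which A returns).
def pvWalkOk (source : String) (prev : List (String × Option String)) : Nat → String → Bool
  | 0, _ => false
  | fuel+1, cur =>
    if cur = source then true
    else
      match List.lookup cur prev with
      | none => false
      | some none => true
      | some (some v) => pvWalkOk source prev fuel v

def Pre_first_hop (source : String) (dest : String) (prev : List (String × Option String)) : Prop :=
  source = dest ∨ pvWalkOk source prev (prev.length + 1) dest = true
instance (source : String) (dest : String) (prev : List (String × Option String)) : Decidable (Pre_first_hop source dest prev) := by unfold Pre_first_hop; infer_instance

def pvWitness_first_hop : String × String × (List (String × Option String)) :=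
  ("a", "c", [("c", some "b"), ("b", some "a")])

def Spec_first_hop (source : String) (dest : String) (prev : List (String × Option String)) (out : Option String) : Prop := out = first_hop_alt source dest prev
instance (source : String) (dest : String) (prev : List (String × Option String)) (out : Option String) : Decidable (Spec_first_hop source dest prev out) := by unfold Spec_first_hop; infer_instance

-- ===== CLAIM (what is proved, stated in full; the proofs are below) =====
def Claim_equal_first_hop : Prop := ∀ (source : String) (dest : String) (prev : List (String × Option String)), Dom_first_hop source dest prev → Pre_first_hop source dest prev → Spec_first_hop source dest prev (first_hop source dest prev)

-- ===== LEMMAS AND PROOFS =====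

-- The path accumulator only gets appended to.
theorem pvBuildPath_acc (source : String) (prev : List (String × Option String)) :
    ∀ (fuel : Nat) (cur : String) (path : List String),
      pvBuildPath source prev fuel cur path
        = (pvBuildPath source prev fuel cur []).map (path ++ ·) := by
  intro fuel
  induction fuel with
  | zero => intro cur path; simp [pvBuildPath]
  | succ n ih =>
    intro cur path
    simp only [pvBuildPath, List.nil_append]
    by_cases h : cur = source
    · simp [h]
    · simp only [h, if_false]
      cases hg : List.lookup cur prev with
      | none => simp
      | some o =>
        cases o with
        | none => simp
        | some v => simp [ih v (path ++ [cur]), ih v [cur], Option.map_map, Function.comp_def]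

theorem pvGetLast?_cons {α : Type} (a : α) (l : List α) (h : l ≠ []) :
    (a :: l).getLast? = l.getLast? := by
  cases l with
  | nil => exact absurd rfl h
  | cons b bs => simp [List.getLast?_cons_cons]

theorem pvDropLast_cons_ne_nil {α : Type} (a : α) (l : List α) (h : l ≠ []) :
    (a :: l).dropLast = a :: l.dropLast ∧ (a :: l).dropLast ≠ [] := by
  cases l with
  | nil => exact absurd rfl h
  | cons b bs => simp

-- path[1] of the reversed path is the second-to-last element of the path.
theorem pvRevGet (l : List String) (hne : l ≠ []) :
    PySem.List.pyGet? l.reverse 1 = l.dropLast.getLast? := by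
  rw [show (1 : Int) = ((1 : Nat) : Int) from rfl, PySem.List.pyGet?_natCast]
  conv_lhs => rw [← List.dropLast_append_getLast hne]
  rw [List.reverse_append]
  simp [← List.head?_eq_getElem?, List.head?_reverse]

-- Core correspondence: wherever the walk terminates (pvWalkOk = true) and cur ≠ source,
-- A's path-building result, post-processed as A does, equals B's look-ahead recursion.
theorem pvHopTo_build (source : String) (prev : List (String × Option String)) :
    ∀ (fuel : Nat) (cur : String),
      pvWalkOk source prev fuel cur = true → cur ≠ source →
      ∃ q, pvBuildPath source prev fuel cur [] = some (cur :: q) ∧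
        ((cur :: q).getLast? = some source →
            2 ≤ (cur :: q).length ∧
            pvHopTo source prev fuel cur = (cur :: q).dropLast.getLast?) ∧
        ((cur :: q).getLast? ≠ some source →
            pvHopTo source prev fuel cur = none) := by
  intro fuel
  induction fuel with
  | zero => intro cur hok; simp [pvWalkOk] at hok
  | succ n ih =>
    intro cur hok hne
    simp only [pvWalkOk, hne, if_false] at hok
    cases hg : List.lookup cur prev with
    | none => simp [hg] at hok
    | some o =>
      cases o with
      | none =>
        refine ⟨[], by simp [pvBuildPath, hne, hg], ?_, ?_⟩
        · intro h; simp at h; exact absurd h hne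
        · intro _; simp [pvHopTo, hg]
      | some v =>
        simp only [hg] at hok
        by_cases hv : v = source
        · -- next node is the source: q = [source], B returns cur
          cases n with
          | zero => simp [pvWalkOk] at hok
          | succ m =>
            refine ⟨[v], ?_, ?_, ?_⟩
            · simp [pvBuildPath, hne, hg, hv]
            · intro _
              constructor
              · simp
              · simp [pvHopTo, hg, hv]
            · intro h; simp [hv] at h
        · obtain ⟨q, hb, hyes, hno⟩ := ih v hok hv
          refine ⟨v :: q, ?_, ?_, ?_⟩
          · simp only [pvBuildPath, hne, if_false, hg, List.nil_append]
            rw [pvBuildPath_acc, hb]; simp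
          · intro hlast
            have hlast' : (v :: q).getLast? = some source := by
              simpa [List.getLast?_cons_cons] using hlast
            obtain ⟨hlen, hw⟩ := hyes hlast'
            constructor
            · simp
            · have hq : q ≠ [] := by
                intro h; subst h; simp at hlast'; exact hv hlast'
              obtain ⟨hdeq, hdne⟩ := pvDropLast_cons_ne_nil v q hq
              rw [show (cur :: v :: q).dropLast = cur :: (v :: q).dropLast from by
                    cases q with
                    | nil => exact absurd rfl hq
                    | cons b bs => simp]
              rw [pvGetLast?_cons cur _ hdne]
              simp only [pvHopTo, hg, hv, if_false]
              exact hw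
          · intro hlast
            have hlast' : (v :: q).getLast? ≠ some source := by
              simpa [List.getLast?_cons_cons] using hlast
            simp only [pvHopTo, hg, hv, if_false]
            exact hno hlast'

-- ===== VERDICT (by name: the statement is the Claim_ definition above) =====
theorem first_hop_spec : Claim_equal_first_hop := by
  intro source dest prev _ hpre
  unfold Spec_first_hop first_hop first_hop_alt
  by_cases hsd : source = dest
  · simp [hsd]
  · have hok : pvWalkOk source prev (prev.length + 1) dest = true := by
      rcases hpre with h | h
      · exact absurd h hsd
      · exact h
    have hds : dest ≠ source := fun h => hsd h.symm
    obtain ⟨q, hb, hyes, hno⟩ := pvHopTo_build source prev (prev.length + 1) dest hok hds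
    simp only [hsd, if_false, hb]
    by_cases hlast : (dest :: q).getLast? = some source
    · obtain ⟨hlen, hw⟩ := hyes hlast
      have hq : q ≠ [] := by
        intro h; subst h; simp at hlast; exact hds hlast
      rw [if_neg (by simp [hlast])]
      have hlen' : 2 ≤ (dest :: q).reverse.length := by
        rw [List.length_reverse]; exact hlen
      rw [if_pos hlen']
      rw [pvRevGet (dest :: q) (by simp)]
      exact hw.symm
    · rw [hno hlast]
      rw [if_pos (by simp [hlast])]
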